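-- pv_equiv track=rewrite | github.com/QUD-comp/rst_to_qud | test.py | find_boundary_segments
-- ===== SOURCE A (Python) =====
-- def find_boundary_segments(edus1, edus2):
--     """
--     Find EDU boundaries according to the trees.
--     Presupposes that edus1 and edus2 contain the same text.
--
--     Parameters
--     ----------
--     edus1 : [str]
--         EDUs from first tree
--     edus2 : [str]
--         EDUs from second tree
--
--     Return
--     ------
--     boundary_segments : [(int, str)]
--         enumerated list of smaller segments given by boundaries from edus1 and edus2
--     """
--
--
--     boundary_segments = []
--
--     while edus1 != [] and edus2 != []:
--         edu1 = edus1[0].strip()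
--         edus1 = edus1[1:]
--         edu2 = edus2[0].strip()
--         edus2 = edus2[1:]
--
--         if edu1 == edu2:
--             boundary_segments.append(edu1)
--         elif edu1.startswith(edu2):
--             boundary_segments.append(edu2)
--             edu1 = edu1[len(edu2):]
--             edus1 = [edu1] + edus1
--         else:
--             boundary_segments.append(edu1)
--             edu2 = edu2[len(edu1):]
--             edus2 = [edu2] + edus2
--
--
--     #simply append remaining EDUs
--     boundary_segments += edus1
--     boundary_segments += edus2
--
--     return list(enumerate(boundary_segments))
-- ===== SOURCE B (Python) =====
-- def find_boundary_segments(edus1, edus2):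
--     # One pass with index pointers and pending-remainder carries: no list slicing or prepend copies.
--     out = []
--     i = j = 0
--     n1, n2 = len(edus1), len(edus2)
--     cur1 = cur2 = None
--     while (cur1 is not None or i < n1) and (cur2 is not None or j < n2):
--         if cur1 is not None:
--             e1, cur1 = cur1.strip(), None
--         else:
--             e1, i = edus1[i].strip(), i + 1
--         if cur2 is not None:
--             e2, cur2 = cur2.strip(), None
--         else:
--             e2, j = edus2[j].strip(), j + 1
--         if e1 == e2:
--             out.append(e1)
--         elif e1.startswith(e2):
--             out.append(e2)
--             cur1 = e1[len(e2):]
--         else: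
--             out.append(e1)
--             cur2 = e2[len(e1):]
--     if cur1 is not None:
--         out.append(cur1)
--     out.extend(edus1[i:])
--     if cur2 is not None:
--         out.append(cur2)
--     out.extend(edus2[j:])
--     return list(enumerate(out))
-- ===== Notes on version B (the rewrite author's own statement) =====
-- stated objective: faster
-- what changed: Replaces A's per-iteration list slicing (edus[1:]) and prepend copies ([rem] + edus) by a single pass with index pointers and an optional pending-remainder carry per side, so each step does O(1) list work.
import Mathlib
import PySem

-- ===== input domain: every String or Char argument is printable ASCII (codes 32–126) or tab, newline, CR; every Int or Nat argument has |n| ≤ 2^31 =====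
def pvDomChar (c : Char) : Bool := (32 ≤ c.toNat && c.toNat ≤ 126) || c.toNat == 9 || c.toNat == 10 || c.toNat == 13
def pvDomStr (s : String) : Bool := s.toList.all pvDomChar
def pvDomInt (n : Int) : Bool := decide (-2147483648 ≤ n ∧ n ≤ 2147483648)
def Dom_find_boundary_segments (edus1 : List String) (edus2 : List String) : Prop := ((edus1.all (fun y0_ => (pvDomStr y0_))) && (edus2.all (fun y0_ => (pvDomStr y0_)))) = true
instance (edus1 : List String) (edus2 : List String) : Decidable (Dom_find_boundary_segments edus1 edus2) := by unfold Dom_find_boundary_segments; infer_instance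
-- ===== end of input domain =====

-- B replaces A's per-iteration list slicing/prepend copies by index pointers with a pending-remainder
-- carry on each side (one pass, O(1) list work per step); return values are identical.

-- ===== PORT A =====
-- the while loop: state is (acc, edus1, edus2); afterwards the remaining EDUs are appended
def fbsLoopA (acc : List String) (edus1 : List String) (edus2 : List String) : List String :=
  match edus1, edus2 with
  | e1h :: t1, e2h :: t2 =>
    let e1 := PySem.Str.strip e1h
    let e2 := PySem.Str.strip e2h
    if e1 == e2 then
      fbsLoopA (acc ++ [e1]) t1 t2
    else if PySem.Str.startswith e1 e2 then
      fbsLoopA (acc ++ [e2]) (PySem.Str.slice e1 (some (PySem.Str.len e2)) none :: t1) t2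
    else
      fbsLoopA (acc ++ [e1]) t1 (PySem.Str.slice e2 (some (PySem.Str.len e1)) none :: t2)
  | _, _ => acc ++ edus1 ++ edus2
termination_by edus1.length + edus2.length
decreasing_by all_goals simp; try omega

def find_boundary_segments (edus1 : List String) (edus2 : List String) : List (Int × String) :=
  PySem.List.enumerate (fbsLoopA [] edus1 edus2) 0

-- ===== PORT B =====
-- 'pop the next element, stripped': the pending carry if present, else the list head at the pointer
-- (the index pointer of Source B is represented by the suffix of the list it points into)
def fbsTake (cur : Option String) (l : List String) : Option (String × List String) :=
  match cur with
  | some c => some (PySem.Str.strip c, l)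
  | none =>
    match l with
    | h :: t => some (PySem.Str.strip h, t)
    | [] => none

-- cited by fbsLoopB's decreasing_by, so it stays above the port
theorem fbsTake_len {cur : Option String} {l : List String} {a : String} {l' : List String}
    (h : fbsTake cur l = some (a, l')) :
    l'.length + 1 = (if cur.isSome then 1 else 0) + l.length := by
  cases cur with
  | some c => simp [fbsTake] at h; obtain ⟨-, rfl⟩ := h; simp; try omega
  | none => cases l with
    | nil => simp [fbsTake] at h
    | cons x t => simp [fbsTake] at h; obtain ⟨-, rfl⟩ := h; simp; try omega

def fbsLoopB (acc : List String) (cur1 : Option String) (l1 : List String)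
    (cur2 : Option String) (l2 : List String) : List String :=
  match h1 : fbsTake cur1 l1, h2 : fbsTake cur2 l2 with
  | some (e1, l1'), some (e2, l2') =>
    if e1 == e2 then
      fbsLoopB (acc ++ [e1]) none l1' none l2'
    else if PySem.Str.startswith e1 e2 then
      fbsLoopB (acc ++ [e2]) (some (PySem.Str.slice e1 (some (PySem.Str.len e2)) none)) l1' none l2'
    else
      fbsLoopB (acc ++ [e1]) none l1' (some (PySem.Str.slice e2 (some (PySem.Str.len e1)) none)) l2'
  | _, _ => acc ++ cur1.toList ++ l1 ++ cur2.toList ++ l2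
termination_by (if cur1.isSome then 1 else 0) + l1.length + ((if cur2.isSome then 1 else 0) + l2.length)
decreasing_by
  · have t1 := fbsTake_len h1; have t2 := fbsTake_len h2; simp; omega
  · have t1 := fbsTake_len h1; have t2 := fbsTake_len h2; simp; omega
  · have t1 := fbsTake_len h1; have t2 := fbsTake_len h2; simp; omega

def find_boundary_segments_alt (edus1 : List String) (edus2 : List String) : List (Int × String) :=
  PySem.List.enumerate (fbsLoopB [] none edus1 none edus2) 0

-- ===== PRECONDITION & SPEC =====
def Spec_find_boundary_segments (edus1 : List String) (edus2 : List String) (out : List (Int × String)) : Prop := out = find_boundary_segments_alt edus1 edus2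
instance (edus1 : List String) (edus2 : List String) (out : List (Int × String)) : Decidable (Spec_find_boundary_segments edus1 edus2 out) := by unfold Spec_find_boundary_segments; infer_instance

-- ===== CLAIM (what is proved, stated in full; the proofs are below) =====
def Claim_equal_find_boundary_segments : Prop := ∀ (edus1 : List String) (edus2 : List String), Dom_find_boundary_segments edus1 edus2 → Spec_find_boundary_segments edus1 edus2 (find_boundary_segments edus1 edus2)

-- ===== LEMMAS AND PROOFS =====

-- popping with fbsTake is popping the head of the carry-plus-suffix list, stripped
theorem fbsTake_cons {cur : Option String} {l : List String} {a : String} {l' : List String}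
    (h : fbsTake cur l = some (a, l')) :
    ∃ araw, cur.toList ++ l = araw :: l' ∧ a = PySem.Str.strip araw := by
  cases cur with
  | some c => simp [fbsTake] at h; exact ⟨c, by simp [h.2], h.1.symm⟩
  | none => cases l with
    | nil => simp [fbsTake] at h
    | cons x t => simp [fbsTake] at h; exact ⟨x, by simp [h.2], h.1.symm⟩

theorem fbsTake_none {cur : Option String} {l : List String}
    (h : fbsTake cur l = none) : cur = none ∧ l = [] := by
  cases cur with
  | some c => simp [fbsTake] at h
  | none => cases l with
    | nil => exact ⟨rfl, rfl⟩
    | cons x t => simp [fbsTake] at h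

-- B's loop state (carry, suffix) corresponds to A's list state carry-consed-onto-suffix
theorem fbsLoop_eq (acc : List String) (cur1 : Option String) (l1 : List String)
    (cur2 : Option String) (l2 : List String) :
    fbsLoopB acc cur1 l1 cur2 l2 = fbsLoopA acc (cur1.toList ++ l1) (cur2.toList ++ l2) := by
  fun_induction fbsLoopB acc cur1 l1 cur2 l2 with
  | case1 acc cur1 l1 cur2 l2 e1 l1' e2 l2' h1 h2 heq ih =>
    obtain ⟨a1, hc1, he1⟩ := fbsTake_cons h1
    obtain ⟨a2, hc2, he2⟩ := fbsTake_cons h2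
    rw [hc1, hc2, fbsLoopA]
    simp only [← he1, ← he2, heq, if_true]
    simpa using ih
  | case2 acc cur1 l1 cur2 l2 e1 l1' e2 l2' h1 h2 hne hsw ih =>
    obtain ⟨a1, hc1, he1⟩ := fbsTake_cons h1
    obtain ⟨a2, hc2, he2⟩ := fbsTake_cons h2
    rw [hc1, hc2, fbsLoopA]
    simp only [← he1, ← he2, hne, hsw, Bool.false_eq_true, if_true, if_false]
    simpa using ih
  | case3 acc cur1 l1 cur2 l2 e1 l1' e2 l2' h1 h2 hne hsw ih =>
    obtain ⟨a1, hc1, he1⟩ := fbsTake_cons h1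
    obtain ⟨a2, hc2, he2⟩ := fbsTake_cons h2
    rw [hc1, hc2, fbsLoopA]
    simp only [← he1, ← he2, hne, hsw, Bool.false_eq_true, if_false]
    simpa using ih
  | case4 acc cur1 l1 cur2 l2 h =>
    cases hh1 : fbsTake cur1 l1 with
    | none =>
      obtain ⟨rfl, rfl⟩ := fbsTake_none hh1
      rw [fbsLoopA]
      all_goals simp
    | some p =>
      obtain ⟨e1, l1'⟩ := p
      cases hh2 : fbsTake cur2 l2 with
      | none =>
        obtain ⟨rfl, rfl⟩ := fbsTake_none hh2
        rw [fbsLoopA]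
        all_goals simp
      | some q =>
        obtain ⟨e2, l2'⟩ := q
        exact (h e1 l1' e2 l2' hh1 hh2).elim

-- ===== VERDICT (by name: the statement is the Claim_ definition above) =====
theorem find_boundary_segments_spec : Claim_equal_find_boundary_segments := by
  intro edus1 edus2 _
  unfold Spec_find_boundary_segments find_boundary_segments find_boundary_segments_alt
  rw [fbsLoop_eq]; simp
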